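-- pv_equiv track=rewrite | github.com/tjcreedy/metamate | categorycounting.py | multicategory
-- ===== SOURCE A (Python) =====
-- def multicategory(countdict, otherdicts):
--
--     """Find all combinations of sets in category dictionaries.
--     First dictionary must have counts of incidences, i.e {x : {a : 1, b : 2}},
--     the rest are passed in a tuple of length >= 1, each can have counts or
--     just sets, i.e. {y : {a , b}}
--     """
--
--     # Check otherdicts is a tuple or error
--
--     if(type(otherdicts) != tuple):
--         otherdicts = (otherdicts,)
--
--     # Initialise master dict with count dict
--     multidict = countdict
--
--     # Work through each further dict combining with master
--     for newdict in otherdicts: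
--
--         # Create new multdict
--         newmulti = dict()
--
--         # Work through categories in master
--         for mcat, mcounts in multidict.items():
--
--             # Work through categories in new dict
--             for ncat, nvalue in newdict.items():
--
--                 # Check if avalue is set of names or dictionary of name:counts
--                 nvalueset = nvalue
--                 if type(nvalue) == "dict":
--                     nvalueset = nvalue.keys()
--
--                 # Find all names shared between current categories
--                 nnames = set(mcounts.keys()).intersection(nvalueset)
--
--                 # Skip combination if no names shared
--                 if len(nnames) == 0:
--                     continue
--
--                 # Create the combined category name
--                 ncat = mcat + ncat
--
--                 # Create a combined subdictionary
--                 newmulti[ncat] = dict()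
--
--                 # Add the minimum value of the two counts for each shared name
--                 if type(nvalue) == "dict":
--                     newmulti[ncat] = {nn : min(mcounts[nn], nvalue[nn])
--                                       for nn in nnames}
--                 else:
--                     newmulti[ncat] = {nn : mcounts[nn] for nn in nnames}
--
--
--
--         # Overwrite old multi_dict
--         multidict = newmulti
--
--     return(multidict)
-- ===== SOURCE B (Python) =====
-- def multicategory(countdict, otherdicts):
--     """Combine category dictionaries via a name->category-positions index,
--     so only overlapping (mcat, ncat) pairs are touched."""
--     if type(otherdicts) != tuple:
--         otherdicts = (otherdicts,)
--     multidict = countdict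
--     for newdict in otherdicts:
--         ncats = list(newdict.keys())
--         # Invert: name -> positions of categories of newdict containing it
--         index = {}
--         for j, nvalue in enumerate(newdict.values()):
--             for nn in nvalue:
--                 index.setdefault(nn, []).append(j)
--         newmulti = {}
--         for mcat, mcounts in multidict.items():
--             # Distribute this category's names over the newdict categories
--             buckets = [[] for _ in ncats]
--             for nn in mcounts:
--                 for j in index.get(nn, ()):
--                     buckets[j].append(nn)
--             for j, bucket in enumerate(buckets):
--                 if bucket:
--                     newmulti[mcat + ncats[j]] = {nn: mcounts[nn] for nn in bucket}
--         multidict = newmulti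
--     return multidict
-- ===== Notes on version B (the rewrite author's own statement) =====
-- stated objective: faster
-- what changed: Instead of intersecting every multidict category with every newdict category via per-pair set operations, B inverts each newdict once into a name->category-positions index and, for each multidict category, distributes its names into per-position buckets, touching only overlapping pairs' names.
import Mathlib
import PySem

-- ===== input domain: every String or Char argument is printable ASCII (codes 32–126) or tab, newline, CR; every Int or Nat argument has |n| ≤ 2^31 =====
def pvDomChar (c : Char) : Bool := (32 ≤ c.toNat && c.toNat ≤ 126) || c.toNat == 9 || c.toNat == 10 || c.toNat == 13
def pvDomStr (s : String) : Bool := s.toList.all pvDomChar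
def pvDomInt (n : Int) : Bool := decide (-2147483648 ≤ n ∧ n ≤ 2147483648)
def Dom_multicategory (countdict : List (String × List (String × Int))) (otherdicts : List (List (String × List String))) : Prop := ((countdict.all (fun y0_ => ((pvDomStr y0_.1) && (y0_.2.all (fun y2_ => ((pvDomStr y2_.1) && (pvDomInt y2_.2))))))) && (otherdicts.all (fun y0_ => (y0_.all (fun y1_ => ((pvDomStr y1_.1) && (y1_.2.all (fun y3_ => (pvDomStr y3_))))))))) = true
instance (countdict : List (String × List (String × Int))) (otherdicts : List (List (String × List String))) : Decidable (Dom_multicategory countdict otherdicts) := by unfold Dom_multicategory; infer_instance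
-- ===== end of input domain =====

-- B replaces A's all-pairs set intersections by a name→category-positions index built once
-- per dict, distributing each category's names into per-position buckets (objective: faster).


-- ===== PORT A =====
-- one pass of A's outer loop: fold over multidict, then over newdict; nnames is
-- set(mcounts.keys()).intersection(nvalue); the `type(nvalue) == "dict"` branches of the
-- Python compare a type to a string and never fire, so only the set branch is ported.
-- The dict comprehension {nn: mcounts[nn] for nn in nnames} is ported as a map over the
-- (duplicate-free) nnames; mcounts[nn] is exact as getD since nn is drawn from mcounts' keys.
def aStep (multidict : List (String × List (String × Int))) (newdict : List (String × List String)) : List (String × List (String × Int)) :=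
  (multidict.foldl (fun newmulti m =>
      newdict.foldl (fun newmulti n =>
          let nnames : PySem.Set String := PySem.Set.inter (PySem.Set.ofList (m.2.map Prod.fst)) n.2
          if nnames.length = 0 then newmulti
          else newmulti.insert (m.1 ++ n.1) (nnames.map (fun nn => (nn, (PySem.Dict.mk m.2).getD nn 0))))
        newmulti)
    PySem.Dict.empty).items

def multicategory (countdict : List (String × List (String × Int))) (otherdicts : List (List (String × List String))) : List (String × List (String × Int)) :=
  otherdicts.foldl aStep countdict

-- ===== PORT B =====
-- index = {}; for j, nvalue in enumerate(newdict.values()): for nn in nvalue: index.setdefault(nn, []).append(j)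
def bIndex (newdict : List (String × List String)) : PySem.Dict String (List Nat) :=
  newdict.zipIdx.foldl (fun idx p =>
    p.1.2.foldl (fun idx nn => idx.modify nn [] (fun l => l ++ [p.2])) idx) PySem.Dict.empty

-- buckets = [[] for _ in ncats]; for nn in mcounts: for j in index.get(nn, ()): buckets[j].append(nn)
def bBuckets (N : Nat) (idx : PySem.Dict String (List Nat)) (mcounts : List (String × Int)) : List (List String) :=
  mcounts.foldl (fun bks p =>
      (idx.getD p.1 []).foldl (fun bks j => bks.set j (bks.getD j [] ++ [p.1])) bks)
    (List.replicate N [])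

-- one pass of B's outer loop; the dict comprehension over a bucket is a map as in port A,
-- and ncats[j] is exact as getD since j indexes newdict.
def bStep (multidict : List (String × List (String × Int))) (newdict : List (String × List String)) : List (String × List (String × Int)) :=
  let ncats := newdict.map Prod.fst
  let idx := bIndex newdict
  (multidict.foldl (fun newmulti m =>
      (bBuckets newdict.length idx m.2).zipIdx.foldl (fun newmulti q =>
          if q.1.isEmpty then newmulti
          else newmulti.insert (m.1 ++ ncats.getD q.2 "") (q.1.map (fun nn => (nn, (PySem.Dict.mk m.2).getD nn 0))))
        newmulti)
    PySem.Dict.empty).items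

def multicategory_alt (countdict : List (String × List (String × Int))) (otherdicts : List (List (String × List String))) : List (String × List (String × Int)) :=
  otherdicts.foldl bStep countdict

-- ===== PRECONDITION & SPEC =====
-- Pre_ excludes only association lists that encode no Python value: an inner counts dict with a
-- repeated key, or a name set with a repeated element (Python dicts/sets cannot contain duplicates).
def Pre_multicategory (countdict : List (String × List (String × Int))) (otherdicts : List (List (String × List String))) : Prop :=
  (∀ p ∈ countdict, (p.2.map Prod.fst).Nodup) ∧ (∀ nd ∈ otherdicts, ∀ q ∈ nd, q.2.Nodup)
instance (countdict : List (String × List (String × Int))) (otherdicts : List (List (String × List String))) : Decidable (Pre_multicategory countdict otherdicts) := by unfold Pre_multicategory; infer_instance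

def pvWitness_multicategory : (List (String × List (String × Int))) × (List (List (String × List String))) :=
  ([("x", [("a", 1), ("b", 2)]), ("y", [("b", 5)])],
   [[("P", ["a", "b"]), ("Q", ["b"])], [("R", ["a", "b"])]])

def Spec_multicategory (countdict : List (String × List (String × Int))) (otherdicts : List (List (String × List String))) (out : List (String × List (String × Int))) : Prop := out = multicategory_alt countdict otherdicts
instance (countdict : List (String × List (String × Int))) (otherdicts : List (List (String × List String))) (out : List (String × List (String × Int))) : Decidable (Spec_multicategory countdict otherdicts out) := by unfold Spec_multicategory; infer_instance

-- ===== CLAIM (what is proved, stated in full; the proofs are below) =====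
def Claim_equal_multicategory : Prop := ∀ (countdict : List (String × List (String × Int))) (otherdicts : List (List (String × List String))), Dom_multicategory countdict otherdicts → Pre_multicategory countdict otherdicts → Spec_multicategory countdict otherdicts (multicategory countdict otherdicts)

-- ===== LEMMAS AND PROOFS =====

theorem map_filter_flat {α β : Type} (l : List α) (q : α → Bool) (f : α → β) :
    (l.filter q).map f = l.flatMap (fun a => if q a then [f a] else []) := by
  induction l with
  | nil => rfl
  | cons x xs ih => by_cases h : q x <;> simp [h, ih]

-- the positions of newdict whose name set contains nn, in ascending order
def idxList (newdict : List (String × List String)) (nn : String) : List Nat :=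
  (newdict.zipIdx.filter (fun p => nn ∈ p.1.2)).map (fun p => p.2)

theorem bIndex_getD (newdict : List (String × List String)) (nn : String)
    (hnd : ∀ q ∈ newdict, q.2.Nodup) :
    (bIndex newdict).getD nn [] = idxList newdict nn := by
  have h1 : bIndex newdict
      = (newdict.zipIdx.flatMap (fun p => p.1.2.map (fun s => (s, p.2)))).foldl
          (fun d q => d.modify q.1 [] (fun l => l ++ [q.2])) PySem.Dict.empty := by
    simp only [bIndex, List.foldl_flatMap, List.foldl_map]
  rw [h1, PySem.Dict.getD_foldl_modify_append]
  simp only [PySem.Dict.getD_empty, List.nil_append, List.filter_flatMap, List.map_flatMap]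
  rw [idxList, map_filter_flat]
  apply List.flatMap_congr
  intro p hp
  have hpmem : p.1 ∈ newdict := by
    obtain ⟨-, hlt, hx⟩ := List.mem_zipIdx hp
    simp only [Nat.zero_add] at hlt; simp only [Nat.sub_zero] at hx
    exact hx ▸ List.getElem_mem hlt
  have hnodup := hnd p.1 hpmem
  rw [List.filter_map]
  have h2 : (List.filter ((fun q => q.1 == nn) ∘ fun s => (s, p.2)) p.1.2)
      = List.filter (fun s => s == nn) p.1.2 := rfl
  rw [h2, List.filter_beq, List.Nodup.count hnodup]
  by_cases h : nn ∈ p.1.2 <;> simp [h]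

theorem mem_idxList (newdict : List (String × List String)) (nn : String) (j : Nat) :
    j ∈ idxList newdict nn ↔ ∃ h : j < newdict.length, nn ∈ newdict[j].2 := by
  unfold idxList
  simp only [List.mem_map, List.mem_filter]
  constructor
  · rintro ⟨p, ⟨hp, hmem⟩, rfl⟩
    obtain ⟨-, hlt, hx⟩ := List.mem_zipIdx hp
    simp only [Nat.zero_add] at hlt
    simp only [Nat.sub_zero] at hx
    exact ⟨hlt, by rw [← hx]; simpa using hmem⟩
  · rintro ⟨h, hmem⟩
    exact ⟨(newdict[j], j), ⟨by simpa using List.mem_zipIdx_iff_getElem?.2 (by simp), by simpa using hmem⟩, rfl⟩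

theorem nodup_idxList (newdict : List (String × List String)) (nn : String) :
    (idxList newdict nn).Nodup := by
  unfold idxList
  have hsub : ((newdict.zipIdx.filter (fun p => nn ∈ p.1.2)).map (fun p => p.2)).Sublist
      (newdict.zipIdx.map Prod.snd) := List.Sublist.map _ List.filter_sublist
  rw [List.zipIdx_map_snd] at hsub
  exact hsub.nodup (List.nodup_range' 1)

theorem lt_of_mem_idxList (newdict : List (String × List String)) (nn : String) (j : Nat)
    (h : j ∈ idxList newdict nn) : j < newdict.length := by
  obtain ⟨hlt, -⟩ := (mem_idxList newdict nn j).1 h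
  exact hlt

-- effect of the inner append loop of bBuckets on one name
theorem foldl_set_append (js : List Nat) (bks : List (List String)) (x : String)
    (hnd : js.Nodup) (hlt : ∀ j ∈ js, j < bks.length) (j : Nat) :
    ((js.foldl (fun bks j => bks.set j (bks.getD j [] ++ [x])) bks).getD j []
      = if j ∈ js then bks.getD j [] ++ [x] else bks.getD j []) ∧
    (js.foldl (fun bks j => bks.set j (bks.getD j [] ++ [x])) bks).length = bks.length := by
  induction js generalizing bks with
  | nil => simp
  | cons j' js ih =>
      simp only [List.foldl_cons]
      have hnd' := hnd.of_cons
      have hjlt : j' < bks.length := hlt j' (by simp)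
      have hlen : (bks.set j' (bks.getD j' [] ++ [x])).length = bks.length := List.length_set
      obtain ⟨ih1, ih2⟩ := ih (bks.set j' (bks.getD j' [] ++ [x])) hnd'
        (fun j hj => by rw [hlen]; exact hlt j (by simp [hj]))
      refine ⟨?_, by rw [ih2, hlen]⟩
      rw [ih1]
      have hgd : ∀ i, (bks.set j' (bks.getD j' [] ++ [x])).getD i []
          = if j' = i then bks.getD j' [] ++ [x] else bks.getD i [] := by
        intro i
        simp only [List.getD_eq_getElem?_getD, List.getElem?_set, hjlt, if_true]
        split
        · next h => subst h; simp
        · rfl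
      by_cases hjin : j ∈ js
      · have : j' ≠ j := fun h => (List.nodup_cons.1 hnd).1 (h ▸ hjin)
        simp [hjin, this]
      · rw [if_neg hjin, hgd j]
        by_cases hj' : j' = j
        · subst hj'; simp
        · simp [hj', hjin, Ne.symm hj']

theorem bBuckets_getD (newdict : List (String × List String)) (mcounts : List (String × Int))
    (hnd : ∀ q ∈ newdict, q.2.Nodup) (j : Nat) :
    (bBuckets newdict.length (bIndex newdict) mcounts).getD j []
      = (mcounts.map Prod.fst).filter (fun nn => j ∈ idxList newdict nn) ∧
    (bBuckets newdict.length (bIndex newdict) mcounts).length = newdict.length := by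
  unfold bBuckets
  suffices h : ∀ bks : List (List String), bks.length = newdict.length →
      ((mcounts.foldl (fun bks p =>
          ((bIndex newdict).getD p.1 []).foldl (fun bks j => bks.set j (bks.getD j [] ++ [p.1])) bks) bks).getD j []
        = bks.getD j [] ++ (mcounts.map Prod.fst).filter (fun nn => j ∈ idxList newdict nn)) ∧
      (mcounts.foldl (fun bks p =>
          ((bIndex newdict).getD p.1 []).foldl (fun bks j => bks.set j (bks.getD j [] ++ [p.1])) bks) bks).length = newdict.length by
    obtain ⟨h1, h2⟩ := h (List.replicate newdict.length []) (List.length_replicate)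
    refine ⟨?_, h2⟩
    rw [h1]
    have : (List.replicate newdict.length ([] : List String)).getD j [] = [] := by
      simp only [List.getD_eq_getElem?_getD, List.getElem?_replicate]
      split <;> rfl
    rw [this, List.nil_append]
  induction mcounts with
  | nil => intro bks hlen; exact ⟨by simp, hlen⟩
  | cons p ps ih =>
      intro bks hlen
      simp only [List.foldl_cons]
      rw [bIndex_getD newdict p.1 hnd]
      obtain ⟨hs, hslen⟩ := foldl_set_append (idxList newdict p.1) bks p.1
        (nodup_idxList newdict p.1)
        (fun j hj => by rw [hlen]; exact lt_of_mem_idxList newdict p.1 j hj) j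
      obtain ⟨ih1, ih2⟩ := ih (((idxList newdict p.1).foldl (fun bks j => bks.set j (bks.getD j [] ++ [p.1])) bks)) (by rw [hslen, hlen])
      refine ⟨?_, ih2⟩
      rw [ih1, hs]
      simp only [List.map_cons, List.filter_cons]
      by_cases hj : j ∈ idxList newdict p.1 <;> simp [hj]

theorem bBuckets_eq_map (newdict : List (String × List String)) (mcounts : List (String × Int))
    (hnd : ∀ q ∈ newdict, q.2.Nodup) :
    bBuckets newdict.length (bIndex newdict) mcounts
      = newdict.map (fun n => (mcounts.map Prod.fst).filter (fun nn => nn ∈ n.2)) := by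
  apply List.ext_getElem
  · rw [(bBuckets_getD newdict mcounts hnd 0).2, List.length_map]
  · intro i h1 h2
    have hlen := (bBuckets_getD newdict mcounts hnd 0).2
    have hi : i < newdict.length := by rw [hlen] at h1; exact h1
    have hgd := (bBuckets_getD newdict mcounts hnd i).1
    rw [List.getD_eq_getElem?_getD, List.getElem?_eq_getElem h1, Option.getD_some] at hgd
    rw [hgd, List.getElem_map]
    apply List.filter_congr
    intro nn _
    have : (i ∈ idxList newdict nn) ↔ (nn ∈ newdict[i].2) := by
      rw [mem_idxList]
      exact ⟨fun ⟨_, hm⟩ => hm, fun hm => ⟨hi, hm⟩⟩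
    exact decide_eq_decide.2 this

theorem foldl_zipIdx_fst {α β : Type} (l : List α) (k : Nat) (f : β → α → β) (init : β) :
    (l.zipIdx k).foldl (fun s q => f s q.1) init = l.foldl f init := by
  induction l generalizing k init with
  | nil => rfl
  | cons x xs ih => simp only [List.zipIdx, List.foldl_cons]; exact ih (k + 1) (f init x)

-- the two inner double loops agree on one multidict entry
theorem step_entry_eq (newdict : List (String × List String)) (m : String × List (String × Int))
    (hnd : ∀ q ∈ newdict, q.2.Nodup) (hm : (m.2.map Prod.fst).Nodup)
    (newmulti : PySem.Dict String (List (String × Int))) :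
    newdict.foldl (fun newmulti n =>
        let nnames : PySem.Set String := PySem.Set.inter (PySem.Set.ofList (m.2.map Prod.fst)) n.2
        if nnames.length = 0 then newmulti
        else newmulti.insert (m.1 ++ n.1) (nnames.map (fun nn => (nn, (PySem.Dict.mk m.2).getD nn 0))))
      newmulti
    = (bBuckets newdict.length (bIndex newdict) m.2).zipIdx.foldl (fun newmulti q =>
        if q.1.isEmpty then newmulti
        else newmulti.insert (m.1 ++ (newdict.map Prod.fst).getD q.2 "") (q.1.map (fun nn => (nn, (PySem.Dict.mk m.2).getD nn 0))))
      newmulti := by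
  rw [← foldl_zipIdx_fst newdict 0 _ newmulti, bBuckets_eq_map newdict m.2 hnd,
    List.zipIdx_map, List.foldl_map]
  apply PySem.List.foldl_congr_mem
  intro acc q hq
  rcases q with ⟨n, j⟩
  obtain ⟨-, hlt, hx⟩ := List.mem_zipIdx hq
  simp only [Nat.zero_add] at hlt
  simp only [Nat.sub_zero] at hx
  have hbucket : PySem.Set.inter (PySem.Set.ofList (m.2.map Prod.fst)) n.2
      = (m.2.map Prod.fst).filter (fun nn => nn ∈ n.2) := by
    rw [PySem.Set.ofList_eq_self_of_nodup _ hm, PySem.Set.inter]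
    apply List.filter_congr
    intro x _
    simp
  have hkey : (newdict.map Prod.fst).getD j "" = n.1 := by
    rw [hx]
    simp [List.getD_eq_getElem?_getD, List.getElem?_map, List.getElem?_eq_getElem hlt]
  simp only [Prod.map, id, hbucket, hkey]
  by_cases hemp : (m.2.map Prod.fst).filter (fun nn => nn ∈ n.2) = []
  · simp [hemp]
  · rw [if_neg (by simpa [List.length_eq_zero_iff] using hemp), if_neg (by simpa [List.isEmpty_iff] using hemp)]

-- invariant: every stored counts list has duplicate-free keys
def GoodMulti (md : List (String × List (String × Int))) : Prop :=
  ∀ p ∈ md, (p.2.map Prod.fst).Nodup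

theorem aStep_eq_bStep (md : List (String × List (String × Int))) (nd : List (String × List String))
    (hnd : ∀ q ∈ nd, q.2.Nodup) (hmd : GoodMulti md) : aStep md nd = bStep md nd := by
  unfold aStep bStep
  congr 1
  apply PySem.List.foldl_congr_mem
  intro acc m hm
  exact step_entry_eq nd m hnd (hmd m hm) acc

theorem inner_values_good (m : String × List (String × Int)) (nd : List (String × List String)) :
    ∀ nm : PySem.Dict String (List (String × Int)), (∀ v ∈ nm.values, (v.map Prod.fst).Nodup) →
    ∀ v ∈ (nd.foldl (fun newmulti n =>
        let nnames : PySem.Set String := PySem.Set.inter (PySem.Set.ofList (m.2.map Prod.fst)) n.2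
        if nnames.length = 0 then newmulti
        else newmulti.insert (m.1 ++ n.1) (nnames.map (fun nn => (nn, (PySem.Dict.mk m.2).getD nn 0))))
      nm).values, (v.map Prod.fst).Nodup := by
  induction nd with
  | nil => intro nm hnm; exact hnm
  | cons n ns ihn =>
      intro nm hnm
      simp only [List.foldl_cons]
      apply ihn
      intro v hv
      simp only at hv
      split at hv
      · exact hnm v hv
      · rcases PySem.Dict.mem_values_insert _ _ _ _ hv with h | h
        · rw [h, List.map_map]
          have h2 : ((fun p => p.1) ∘ fun nn => (nn, (PySem.Dict.mk m.2).getD nn 0)) = id := rfl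
          rw [h2, List.map_id]
          exact PySem.Set.nodup_inter _ _ (PySem.Set.nodup_ofList _)
        · exact hnm v h

theorem outer_values_good (md : List (String × List (String × Int))) (nd : List (String × List String)) :
    ∀ nm : PySem.Dict String (List (String × Int)), (∀ v ∈ nm.values, (v.map Prod.fst).Nodup) →
    ∀ v ∈ (md.foldl (fun newmulti m =>
        nd.foldl (fun newmulti n =>
          let nnames : PySem.Set String := PySem.Set.inter (PySem.Set.ofList (m.2.map Prod.fst)) n.2
          if nnames.length = 0 then newmulti
          else newmulti.insert (m.1 ++ n.1) (nnames.map (fun nn => (nn, (PySem.Dict.mk m.2).getD nn 0))))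
          newmulti)
      nm).values, (v.map Prod.fst).Nodup := by
  induction md with
  | nil => intro nm hnm; exact hnm
  | cons m ms ih =>
      intro nm hnm
      simp only [List.foldl_cons]
      exact ih _ (inner_values_good m nd nm hnm)

theorem aStep_good (md : List (String × List (String × Int))) (nd : List (String × List String)) :
    GoodMulti (aStep md nd) := by
  intro p hp
  unfold aStep at hp
  exact outer_values_good md nd PySem.Dict.empty
    (by intro v hv; simp [PySem.Dict.values, PySem.Dict.empty] at hv)
    p.2 (by simpa [PySem.Dict.values] using List.mem_map_of_mem hp (f := Prod.snd))

theorem foldl_steps_eq (ods : List (List (String × List String))) :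
    ∀ cd, GoodMulti cd → (∀ nd ∈ ods, ∀ q ∈ nd, q.2.Nodup) →
      ods.foldl aStep cd = ods.foldl bStep cd := by
  induction ods with
  | nil => intro cd _ _; rfl
  | cons nd rest ih =>
      intro cd hcd h2
      simp only [List.foldl_cons]
      rw [aStep_eq_bStep cd nd (h2 nd (by simp)) hcd]
      refine ih (bStep cd nd) ?_ (fun nd' h => h2 nd' (by simp [h]))
      rw [← aStep_eq_bStep cd nd (h2 nd (by simp)) hcd]
      exact aStep_good cd nd

-- ===== VERDICT (by name: the statement is the Claim_ definition above) =====
theorem multicategory_spec : Claim_equal_multicategory := by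
  intro countdict otherdicts _ hpre
  exact foldl_steps_eq otherdicts countdict hpre.1 hpre.2
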